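-- pv_equiv track=rewrite | github.com/lewinskydmitry/MIPT-Algorithms | week 2/problem 1/score_analysis.py | func
-- ===== SOURCE A (Python) =====
-- def binsearch_left(x, key):
--     l = -1
--     r = len(x)
--     while r - l > 1:
--         m = (l + r) // 2
--         if x[m] < key:
--             l = m
--         else:
--             r = m
--     return r
--
-- def binsearch_right(x, key):
--     l = -1
--     r = len(x)
--     while r - l > 1:
--         m = (l + r) // 2
--         if x[m] <= key:
--             l = m
--         else:
--             r = m
--     return r
--
-- def func(scores, left, right):
--     scores.sort()
--     ans = list()
--     for i in range(len(left)):
--         r_index = binsearch_right(scores, right[i])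
--         l_index = binsearch_left(scores, left[i])
--         ans1 = r_index - l_index
--         ans.append(ans1)
--     return ans
-- ===== SOURCE B (Python) =====
-- def func(scores, left, right):
--     # Direct counting instead of per-query binary search; scores is still
--     # sorted in place (same observable mutation as the original).
--     scores.sort()
--     return [sum(s <= r for s in scores) - sum(s < l for s in scores)
--             for l, r in zip(left, right)]
-- ===== Notes on version B (the rewrite author's own statement) =====
-- stated objective: alternative
-- what changed: Replaces the two hand-rolled binary searches per query with direct linear counting (count of scores <= right minus count of scores < left) over a zip of the query lists, eliminating the binary-search helpers entirely; scores is still sorted in place.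
import Mathlib
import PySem

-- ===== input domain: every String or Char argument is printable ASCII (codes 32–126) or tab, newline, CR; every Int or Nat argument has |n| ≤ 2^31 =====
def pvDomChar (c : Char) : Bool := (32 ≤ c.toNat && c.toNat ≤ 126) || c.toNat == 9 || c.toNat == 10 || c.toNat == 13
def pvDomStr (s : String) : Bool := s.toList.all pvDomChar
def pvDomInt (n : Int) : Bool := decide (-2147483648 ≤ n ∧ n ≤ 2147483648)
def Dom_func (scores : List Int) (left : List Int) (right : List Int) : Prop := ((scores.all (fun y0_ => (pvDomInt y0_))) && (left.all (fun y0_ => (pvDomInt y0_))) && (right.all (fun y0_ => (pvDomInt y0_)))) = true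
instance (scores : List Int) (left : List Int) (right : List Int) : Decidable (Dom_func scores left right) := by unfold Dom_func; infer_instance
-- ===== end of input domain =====

-- B replaces A's per-query binary searches by direct linear counting over zip(left, right);
-- both versions sort `scores` in place (the equivalence proved is about the return value).

-- ===== PORT A =====
-- while loop of binsearch_left (x[m] is always in range when called from binsearch_left)
def bsLoopL (x : List Int) (key : Int) (l r : Int) : Int :=
  if _h : r - l > 1 then
    let m := PySem.Int.floordiv (l + r) 2
    if PySem.List.pyGetD x m 0 < key then bsLoopL x key m r else bsLoopL x key l m
  else r
termination_by (r - l).toNat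
decreasing_by
  all_goals
    simp only [PySem.Int.floordiv_eq_ediv_of_pos (by norm_num : (0:Int) < 2)]
    omega

-- while loop of binsearch_right
def bsLoopR (x : List Int) (key : Int) (l r : Int) : Int :=
  if _h : r - l > 1 then
    let m := PySem.Int.floordiv (l + r) 2
    if PySem.List.pyGetD x m 0 ≤ key then bsLoopR x key m r else bsLoopR x key l m
  else r
termination_by (r - l).toNat
decreasing_by
  all_goals
    simp only [PySem.Int.floordiv_eq_ediv_of_pos (by norm_num : (0:Int) < 2)]
    omega

def binsearchLeft (x : List Int) (key : Int) : Int := bsLoopL x key (-1) (x.length : Int)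

def binsearchRight (x : List Int) (key : Int) : Int := bsLoopR x key (-1) (x.length : Int)

def func (scores : List Int) (left : List Int) (right : List Int) : List Int :=
  let s := PySem.List.sorted scores (fun v => v) false
  (PySem.List.pyRange 0 (left.length : Int) 1).foldl
    (fun ans i =>
      ans ++ [binsearchRight s (PySem.List.pyGetD right i 0)
                - binsearchLeft s (PySem.List.pyGetD left i 0)]) []

-- ===== PORT B =====
def func_alt (scores : List Int) (left : List Int) (right : List Int) : List Int :=
  let s := PySem.List.sorted scores (fun v => v) false
  (left.zip right).map (fun lr =>
    (s.map (fun v => if v ≤ lr.2 then (1 : Int) else 0)).sum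
      - (s.map (fun v => if v < lr.1 then (1 : Int) else 0)).sum)

-- ===== PRECONDITION & SPEC =====
-- Pre_ excludes exactly the inputs with len(right) < len(left), on which A raises IndexError.
def Pre_func (scores : List Int) (left : List Int) (right : List Int) : Prop :=
  left.length ≤ right.length
instance (scores : List Int) (left : List Int) (right : List Int) : Decidable (Pre_func scores left right) := by unfold Pre_func; infer_instance

def pvWitness_func : List Int × List Int × List Int := ([2, 1, 3], [1, 2], [2, 3, 5])

def Spec_func (scores : List Int) (left : List Int) (right : List Int) (out : List Int) : Prop := out = func_alt scores left right
instance (scores : List Int) (left : List Int) (right : List Int) (out : List Int) : Decidable (Spec_func scores left right out) := by unfold Spec_func; infer_instance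

-- ===== CLAIM (what is proved, stated in full; the proofs are below) =====
def Claim_equal_func : Prop := ∀ (scores : List Int) (left : List Int) (right : List Int), Dom_func scores left right → Pre_func scores left right → Spec_func scores left right (func scores left right)

-- ===== LEMMAS AND PROOFS =====

-- downward-closed predicates cut a sorted list into a true prefix and a false suffix:
-- p holds at index m iff m < countP p
lemma pv_prefix_iff (p : Int → Bool) (hp : ∀ a b : Int, a ≤ b → p b = true → p a = true) :
    ∀ (x : List Int), x.Pairwise (fun a b => a ≤ b) →
      ∀ (m : Nat) (hm : m < x.length), (p x[m] = true ↔ m < x.countP p) := by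
  intro x
  induction x with
  | nil => intro _ m hm; simp at hm
  | cons a t ih =>
    intro hs m hm
    have hst : t.Pairwise (fun a b => a ≤ b) := (List.pairwise_cons.mp hs).2
    have hall : ∀ b ∈ t, a ≤ b := (List.pairwise_cons.mp hs).1
    cases m with
    | zero =>
      simp only [List.getElem_cons_zero, List.countP_cons]
      constructor
      · intro hpa; simp [hpa]
      · intro hlt
        by_contra hna
        have h0 : t.countP p = 0 := by
          rw [List.countP_eq_zero]
          intro b hb hpb
          exact (by simpa [hna] using hp a b (hall b hb) hpb)
        simp [h0, hna] at hlt
    | succ k =>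
      have hk : k < t.length := by simpa using hm
      have := ih hst k hk
      simp only [List.getElem_cons_succ, List.countP_cons]
      by_cases hpa : p a = true
      · simp [this, hpa]
      · have h0 : t.countP p = 0 := by
          rw [List.countP_eq_zero]
          intro b hb hpb
          exact (by simpa [hpa] using hp a b (hall b hb) hpb)
        have hpk : p t[k] ≠ true := by
          intro h
          exact hpa (hp a t[k] (hall _ (List.getElem_mem hk)) h)
        simp [hpk, h0, hpa]

-- sum of a 0/1 comprehension is a count
lemma pv_sum_ite_le (w : Int) (s : List Int) :
    (List.map (fun v => if v ≤ w then (1 : Int) else 0) s).sum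
      = (s.countP (fun v => decide (v ≤ w)) : Int) := by
  simpa using PySem.List.sum_map_ite_one_zero (fun v => decide (v ≤ w)) s

lemma pv_sum_ite_lt (w : Int) (s : List Int) :
    (List.map (fun v => if v < w then (1 : Int) else 0) s).sum
      = (s.countP (fun v => decide (v < w)) : Int) := by
  simpa using PySem.List.sum_map_ite_one_zero (fun v => decide (v < w)) s

lemma pv_bsLoopL_eq (x : List Int) (key : Int) (hs : x.Pairwise (fun a b => a ≤ b)) :
    ∀ (n : Nat) (l r : Int), (r - l).toNat ≤ n → -1 ≤ l → r ≤ (x.length : Int) → l < r →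
      l + 1 ≤ (x.countP (fun v => decide (v < key)) : Int) →
      (x.countP (fun v => decide (v < key)) : Int) ≤ r →
      bsLoopL x key l r = (x.countP (fun v => decide (v < key)) : Int) := by
  intro n
  induction n with
  | zero => intro l r hn _ _ hlr _ _; omega
  | succ n ih =>
    intro l r hn hl hr hlr hc1 hc2
    rw [bsLoopL]
    split
    · rename_i hgap
      set c : Int := (x.countP (fun v => decide (v < key)) : Int) with hcdef
      have hm2 : PySem.Int.floordiv (l + r) 2 = (l + r) / 2 :=
        PySem.Int.floordiv_eq_ediv_of_pos (by norm_num)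
      have hmlo : l < PySem.Int.floordiv (l + r) 2 := by rw [hm2]; omega
      have hmhi : PySem.Int.floordiv (l + r) 2 < r := by rw [hm2]; omega
      set m : Int := PySem.Int.floordiv (l + r) 2 with hmdef
      have hm0 : 0 ≤ m := by omega
      have hmlen : m < (x.length : Int) := by omega
      have hmn : m.toNat < x.length := by omega
      have hget : PySem.List.pyGetD x m 0 = x[m.toNat] :=
        PySem.List.pyGetD_eq_getElem x 0 hm0 hmlen
      have hiff := pv_prefix_iff (fun v => decide (v < key))
        (fun a b hab hb => by simp_all; omega) x hs m.toNat hmn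
      change (if PySem.List.pyGetD x m 0 < key then bsLoopL x key m r else bsLoopL x key l m) = c
      rw [hget]
      split
      · rename_i hlt
        have : m.toNat < x.countP (fun v => decide (v < key)) := hiff.mp (by simp [hlt])
        exact ih m r (by omega) (by omega) hr hmhi (by omega) hc2
      · rename_i hnlt
        have : ¬ m.toNat < x.countP (fun v => decide (v < key)) := by
          intro h
          exact hnlt (by simpa using hiff.mpr h)
        exact ih l m (by omega) hl (by omega) hmlo hc1 (by omega)
    · omega

lemma pv_bsLoopR_eq (x : List Int) (key : Int) (hs : x.Pairwise (fun a b => a ≤ b)) :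
    ∀ (n : Nat) (l r : Int), (r - l).toNat ≤ n → -1 ≤ l → r ≤ (x.length : Int) → l < r →
      l + 1 ≤ (x.countP (fun v => decide (v ≤ key)) : Int) →
      (x.countP (fun v => decide (v ≤ key)) : Int) ≤ r →
      bsLoopR x key l r = (x.countP (fun v => decide (v ≤ key)) : Int) := by
  intro n
  induction n with
  | zero => intro l r hn _ _ hlr _ _; omega
  | succ n ih =>
    intro l r hn hl hr hlr hc1 hc2
    rw [bsLoopR]
    split
    · rename_i hgap
      set c : Int := (x.countP (fun v => decide (v ≤ key)) : Int) with hcdef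
      have hm2 : PySem.Int.floordiv (l + r) 2 = (l + r) / 2 :=
        PySem.Int.floordiv_eq_ediv_of_pos (by norm_num)
      have hmlo : l < PySem.Int.floordiv (l + r) 2 := by rw [hm2]; omega
      have hmhi : PySem.Int.floordiv (l + r) 2 < r := by rw [hm2]; omega
      set m : Int := PySem.Int.floordiv (l + r) 2 with hmdef
      have hm0 : 0 ≤ m := by omega
      have hmlen : m < (x.length : Int) := by omega
      have hmn : m.toNat < x.length := by omega
      have hget : PySem.List.pyGetD x m 0 = x[m.toNat] :=
        PySem.List.pyGetD_eq_getElem x 0 hm0 hmlen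
      have hiff := pv_prefix_iff (fun v => decide (v ≤ key))
        (fun a b hab hb => by simp_all; omega) x hs m.toNat hmn
      change (if PySem.List.pyGetD x m 0 ≤ key then bsLoopR x key m r else bsLoopR x key l m) = c
      rw [hget]
      split
      · rename_i hlt
        have : m.toNat < x.countP (fun v => decide (v ≤ key)) := hiff.mp (by simp [hlt])
        exact ih m r (by omega) (by omega) hr hmhi (by omega) hc2
      · rename_i hnlt
        have : ¬ m.toNat < x.countP (fun v => decide (v ≤ key)) := by
          intro h
          exact hnlt (by simpa using hiff.mpr h)
        exact ih l m (by omega) hl (by omega) hmlo hc1 (by omega)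
    · omega

lemma pv_binsearchLeft_eq (x : List Int) (key : Int) (hs : x.Pairwise (fun a b => a ≤ b)) :
    binsearchLeft x key = (x.countP (fun v => decide (v < key)) : Int) := by
  have hc : x.countP (fun v => decide (v < key)) ≤ x.length := List.countP_le_length
  exact pv_bsLoopL_eq x key hs (x.length + 1) (-1) (x.length : Int)
    (by omega) (by omega) (by omega) (by omega) (by omega) (by omega)

lemma pv_binsearchRight_eq (x : List Int) (key : Int) (hs : x.Pairwise (fun a b => a ≤ b)) :
    binsearchRight x key = (x.countP (fun v => decide (v ≤ key)) : Int) := by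
  have hc : x.countP (fun v => decide (v ≤ key)) ≤ x.length := List.countP_le_length
  exact pv_bsLoopR_eq x key hs (x.length + 1) (-1) (x.length : Int)
    (by omega) (by omega) (by omega) (by omega) (by omega) (by omega)

-- ===== VERDICT (by name: the statement is the Claim_ definition above) =====
theorem func_spec : Claim_equal_func := by
  intro scores left right _ hpre
  unfold Spec_func func func_alt
  have hpre' : left.length ≤ right.length := hpre
  set s : List Int := PySem.List.sorted scores (fun v => v) false with hsdef
  have hs : s.Pairwise (fun a b => a ≤ b) := PySem.List.sorted_pairwise scores (fun v => v)
  rw [PySem.List.pyRange_zero_natCast, PySem.List.foldl_append_singleton_eq_map,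
    List.map_map, List.nil_append]
  apply List.ext_getElem
  · simp [hpre']
  · intro i h1 h2
    have hi : i < left.length := by simpa using h1
    have hir : i < right.length := lt_of_lt_of_le hi hpre'
    simp only [List.getElem_map, List.getElem_range, Function.comp_apply, List.getElem_zip,
      PySem.List.pyGetD_natCast, List.getD_eq_getElem left 0 hi, List.getD_eq_getElem right 0 hir]
    rw [pv_binsearchLeft_eq s _ hs, pv_binsearchRight_eq s _ hs,
      pv_sum_ite_le, pv_sum_ite_lt]
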